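-- pv_equiv track=rewrite | github.com/yanghaku/FEAD | GA/LVW.py | get_bin_num
-- ===== SOURCE A (Python) =====
-- def get_bin_num(xx):
--     ans = 0
--     x = xx.copy()[0]
--     for i in range(13):
--         if x & 1 == 1:
--             ans += 1
--         x >>= 1
--     return ans
-- ===== SOURCE B (Python) =====
-- def get_bin_num(xx):
--     return (xx.copy()[0] & 0x1FFF).bit_count()
-- ===== Notes on version B (the rewrite author's own statement) =====
-- stated objective: idiomatic
-- what changed: Replaces the 13-iteration shift-and-test loop with a single mask of the low 13 bits (& 0x1FFF) followed by int.bit_count().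
import Mathlib
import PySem

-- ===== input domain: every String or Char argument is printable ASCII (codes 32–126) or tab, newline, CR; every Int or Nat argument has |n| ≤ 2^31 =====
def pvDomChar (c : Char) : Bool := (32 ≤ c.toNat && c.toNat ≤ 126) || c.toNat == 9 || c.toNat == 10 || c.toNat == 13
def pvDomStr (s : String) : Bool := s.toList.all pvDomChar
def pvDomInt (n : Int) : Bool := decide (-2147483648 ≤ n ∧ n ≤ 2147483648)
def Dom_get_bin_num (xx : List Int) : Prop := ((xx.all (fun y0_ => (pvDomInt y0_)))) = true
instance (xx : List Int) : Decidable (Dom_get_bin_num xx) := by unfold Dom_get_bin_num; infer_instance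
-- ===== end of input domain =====

-- B replaces A's 13-iteration shift-and-test loop with one mask (& 0x1FFF) plus int.bit_count() (idiomatic).
-- Both raise IndexError on the empty list (xx.copy()[0]); Pre_ excludes exactly that.

-- ===== PORT A =====
-- ans = 0; x = xx.copy()[0]; for i in range(13): if x & 1 == 1: ans += 1; x >>= 1; return ans
def get_bin_num (xx : List Int) : Int :=
  match PySem.List.pyGet? xx 0 with  -- xx.copy()[0]: the copy of an immutable Lean list is the list itself
  | none => 0   -- unreachable under Pre_ (Python raises IndexError)
  | some x0 =>
    ((PySem.List.pyRange 0 13 1).foldl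
      (fun (st : Int × Int) _ =>
        ((if PySem.Int.band st.2 1 == 1 then st.1 + 1 else st.1), st.2 >>> (1:Nat)))
      (0, x0)).1

-- ===== PORT B =====
-- return (xx.copy()[0] & 0x1FFF).bit_count()
def get_bin_num_alt (xx : List Int) : Int :=
  match PySem.List.pyGet? xx 0 with  -- xx.copy()[0]: the copy of an immutable Lean list is the list itself
  | none => 0   -- unreachable under Pre_ (Python raises IndexError)
  | some x0 => ((PySem.Int.bitCount (PySem.Int.band x0 8191) : Nat) : Int)

-- ===== PRECONDITION & SPEC =====
-- A raises IndexError on the empty list; no other input raises.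
def Pre_get_bin_num (xx : List Int) : Prop := xx ≠ []
instance (xx : List Int) : Decidable (Pre_get_bin_num xx) := by unfold Pre_get_bin_num; infer_instance
def pvWitness_get_bin_num : List Int := ([5])

def Spec_get_bin_num (xx : List Int) (out : Int) : Prop := out = get_bin_num_alt xx
instance (xx : List Int) (out : Int) : Decidable (Spec_get_bin_num xx out) := by unfold Spec_get_bin_num; infer_instance

-- ===== CLAIM (what is proved, stated in full; the proofs are below) =====
def Claim_equal_get_bin_num : Prop := ∀ (xx : List Int), Dom_get_bin_num xx → Pre_get_bin_num xx → Spec_get_bin_num xx (get_bin_num xx)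

-- ===== LEMMAS AND PROOFS =====

-- n-step peeled form of A's loop body (same tests, same shifts)
def pvPc : Nat → Int → Int
  | 0, _ => 0
  | n+1, x => (if PySem.Int.band x 1 == 1 then 1 else 0) + pvPc n (x >>> (1:Nat))

-- A's fold over any list computes ans + pvPc (length) x
theorem pvFold_eq_pc (l : List Int) : ∀ (ans x : Int),
    (l.foldl (fun (st : Int × Int) _ =>
      ((if PySem.Int.band st.2 1 == 1 then st.1 + 1 else st.1), st.2 >>> (1:Nat))) (ans, x)).1
    = ans + pvPc l.length x := by
  induction l with
  | nil => intro ans x; simp [pvPc]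
  | cons a l ih =>
    intro ans x
    simp only [List.foldl_cons, List.length_cons, pvPc, ih]
    split <;> ring

-- pvPc n x counts the ones of x's low n bits
theorem pvPc_eq_bitCount (n : Nat) : ∀ (x : Int),
    pvPc n x = ((PySem.Int.bitCount (x % ((2 ^ n : Nat) : Int)) : Nat) : Int) := by
  induction n with
  | zero => intro x; simp [pvPc, PySem.Int.bitCount_zero]
  | succ n ih =>
    intro x
    have hP : (0:Int) < ((2 ^ n : Nat) : Int) := by positivity
    have hpow : ((2 ^ (n+1) : Nat) : Int) = 2 * ((2 ^ n : Nat) : Int) := by push_cast; ring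
    have hdvd : (2:Int) ∣ ((2 ^ (n+1) : Nat) : Int) := ⟨((2 ^ n : Nat) : Int), hpow⟩
    have h1 : (x % ((2 ^ (n+1) : Nat) : Int)) % 2 = x % 2 := Int.emod_emod_of_dvd x hdvd
    have hsr : x >>> (1:Nat) = x / 2 := by simpa using Int.shiftRight_eq_div_pow x 1
    have hband : PySem.Int.band x 1 = x % 2 := by
      rw [PySem.Int.band_one, PySem.Int.mod_eq_emod_of_pos (by norm_num)]
    have hy0 : 0 ≤ x % ((2 ^ (n+1) : Nat) : Int) := Int.emod_nonneg x (by positivity)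
    have hyhi : x % ((2 ^ (n+1) : Nat) : Int) < 2 * ((2 ^ n : Nat) : Int) := by
      have := Int.emod_lt_of_pos x (b := ((2 ^ (n+1) : Nat) : Int)) (by positivity)
      omega
    have h2' : (x % ((2 ^ (n+1) : Nat) : Int)) / 2 = (x / 2) % ((2 ^ n : Nat) : Int) := by
      have hqr : ((2 ^ (n+1) : Nat) : Int) * (x / ((2 ^ (n+1) : Nat) : Int))
          + x % ((2 ^ (n+1) : Nat) : Int) = x := Int.ediv_add_emod x _
      have hx2 : x / 2 = x % ((2 ^ (n+1) : Nat) : Int) / 2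
          + ((2 ^ n : Nat) : Int) * (x / ((2 ^ (n+1) : Nat) : Int)) := by
        conv_lhs => rw [← hqr]
        rw [show ((2 ^ (n+1) : Nat) : Int) * (x / ((2 ^ (n+1) : Nat) : Int))
              + x % ((2 ^ (n+1) : Nat) : Int)
            = x % ((2 ^ (n+1) : Nat) : Int)
              + (((2 ^ n : Nat) : Int) * (x / ((2 ^ (n+1) : Nat) : Int))) * 2 by
              rw [hpow]; ring,
          Int.add_mul_ediv_right _ _ (by norm_num : (2:Int) ≠ 0)]
      conv_rhs => rw [hx2]
      rw [Int.add_mul_emod_self_left]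
      exact (Int.emod_eq_of_lt (by omega) (by omega)).symm
    rcases eq_or_lt_of_le hy0 with hz | hpos
    · have hz' : x % ((2 ^ (n+1) : Nat) : Int) = 0 := hz.symm
      have hx2z : x % 2 = 0 := by rw [← h1, hz']; rfl
      have hxdz : (x / 2) % ((2 ^ n : Nat) : Int) = 0 := by rw [← h2', hz']; rfl
      simp only [pvPc, hband, hx2z, hsr, ih, hxdz, hz']
      norm_num
    · have hbc := PySem.Int.bitCount_of_pos hpos
      rw [PySem.Int.mod_eq_emod_of_pos (by norm_num),
        PySem.Int.floordiv_eq_ediv_of_pos (by norm_num), h1, h2'] at hbc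
      simp only [pvPc, hband, hsr, ih, hbc]
      rcases Int.emod_two_eq_zero_or_one x with h | h <;> rw [h] <;> push_cast <;> norm_num

-- the mask: x & 0x1FFF is x mod 2^13 (Python two's-complement & on any sign)
theorem pvBand_mask (x : Int) : PySem.Int.band x 8191 = x % 8192 := by
  unfold PySem.Int.band
  rcases le_or_gt 0 x with hx | hx
  · simp only [hx, if_pos, if_pos (by norm_num : (0:Int) ≤ 8191)]
    have hm := Nat.and_two_pow_sub_one_eq_mod x.toNat 13
    rw [show (2:Nat) ^ 13 - 1 = 8191 from rfl, show (2:Nat) ^ 13 = 8192 from rfl] at hm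
    rw [show Int.toNat 8191 = 8191 from rfl, hm]
    omega
  · have hx' : ¬ (0 ≤ x) := by omega
    simp only [hx', if_pos (by norm_num : (0:Int) ≤ 8191), if_false]
    have hm := Nat.and_two_pow_sub_one_eq_mod (-x - 1).toNat 13
    rw [show (2:Nat) ^ 13 - 1 = 8191 from rfl, show (2:Nat) ^ 13 = 8192 from rfl] at hm
    rw [show Int.toNat 8191 = 8191 from rfl, Nat.and_comm, hm]
    omega

-- ===== VERDICT (by name: the statement is the Claim_ definition above) =====
theorem get_bin_num_spec : Claim_equal_get_bin_num := by
  intro xx _ hpre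
  unfold Spec_get_bin_num get_bin_num get_bin_num_alt
  cases xx with
  | nil => exact absurd rfl hpre
  | cons a l =>
    have hget : PySem.List.pyGet? (a :: l) 0 = some a := by
      simp [PySem.List.pyGet?, PySem.List.pyIdx?]
    rw [hget]
    dsimp only
    rw [pvFold_eq_pc]
    have hlen : (PySem.List.pyRange 0 13 1).length = 13 := by decide
    rw [hlen, pvPc_eq_bitCount, pvBand_mask]
    norm_num
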